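-- pv_equiv track=rewrite | github.com/isk02206/python | informatics/series 6 advanced/polka_dot.py | polka
-- ===== SOURCE A (Python) =====
-- def deal(list_tuple_string):
--     '''
--     >>> deal((0, 1, 2, 3, 4, 5, 6, 7, 8, 9, 10))
--     [0, 2, 4, 6, 8, 10, 3, 7, 1, 9, 5]
--     >>> deal([0, 8, 1, 6, 2, 10, 3, 7, 4, 9, 5])
--     [0, 1, 2, 3, 4, 5, 6, 7, 8, 9, 10]
--     >>> deal('ABCDEFGHIJKLMOP')
--     ['A', 'C', 'E', 'G', 'I', 'K', 'M', 'P', 'D', 'H', 'L', 'B', 'J', 'F', 'O']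
--     >>> deal('ALBICODJEMFKGPH')
--     ['A', 'B', 'C', 'D', 'E', 'F', 'G', 'H', 'I', 'J', 'K', 'L', 'M', 'O', 'P']
--     '''
--     # type change list type
--     list_word = list(list_tuple_string)
--     new_list =[]
--     # length of new_list equal length of list or tuple or string
--     while len(new_list) != len(list_tuple_string):
--         new_list.append(list_word[0])
--         # list_word length more than 3
--         if len(list_word) >= 3:
--             list_word = list_word[2:] + [list_word[1]]
--             #list word first value move final value
--         else:
--             new_list.append(list_word[-1])
--             # list_word length < 3 fianl value append new list
--     return new_list
--
-- def polka(list_tuple_string):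
--     '''
--     >>> polka((0, 2, 4, 6, 8, 10, 3, 7, 1, 9, 5))
--     [0, 1, 2, 3, 4, 5, 6, 7, 8, 9, 10]
--     >>> polka([0, 1, 2, 3, 4, 5, 6, 7, 8, 9, 10])
--     [0, 8, 1, 6, 2, 10, 3, 7, 4, 9, 5]
--     >>> polka('ACEGIKMPDHLBJFO')
--     ['A', 'B', 'C', 'D', 'E', 'F', 'G', 'H', 'I', 'J', 'K', 'L', 'M', 'O', 'P']
--     >>> polka('ABCDEFGHIJKLMOP')
--     ['A', 'L', 'B', 'I', 'C', 'O', 'D', 'J', 'E', 'M', 'F', 'K', 'G', 'P', 'H']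
--     '''
--     list_word = list(list_tuple_string)
--     # make list type word
--     length_list_word = len(list_word)
--     filling_order = deal([i for i in range(length_list_word)])
--     scheme = [ ['.'] * length_list_word ] * length_list_word
--     # make list in list
--
--     for i in range(length_list_word):
--         char = list_word[i]
--         column = filling_order[i]
--         for j in range(length_list_word-i): # -i because filling value pass list
--             row = -1-j
--             update = list(scheme[row])
--             #update scheme inside list
--             update[column] = char
--             scheme[row] = list(update)
--
--     return scheme[-1]
-- ===== SOURCE B (Python) =====
-- def polka(list_tuple_string):
--     seq = list(list_tuple_string)
--     n = len(seq)
--     # compute the filling order by simulating the deal on indices with a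
--     # grow-only queue (head pointer i) instead of repeated list slicing
--     q = list(range(n))
--     fo = []
--     i = 0
--     while len(fo) < n:
--         fo.append(q[i])
--         if len(q) - i >= 3:
--             q.append(q[i + 1])
--             i += 2
--         else:
--             fo.append(q[-1])
--     # single scatter pass: item i goes to position fo[i]
--     result = [0] * n
--     for k in range(n):
--         result[fo[k]] = seq[k]
--     return result
-- ===== Notes on version B (the rewrite author's own statement) =====
-- stated objective: faster
-- what changed: B computes the filling order by simulating the deal on indices with a grow-only queue and head pointer (no list slicing), then places each item directly with result[fo[k]] = seq[k] in one pass, instead of A's rebuilding of whole rows of an n-by-n scheme for every item.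
import Mathlib
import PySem

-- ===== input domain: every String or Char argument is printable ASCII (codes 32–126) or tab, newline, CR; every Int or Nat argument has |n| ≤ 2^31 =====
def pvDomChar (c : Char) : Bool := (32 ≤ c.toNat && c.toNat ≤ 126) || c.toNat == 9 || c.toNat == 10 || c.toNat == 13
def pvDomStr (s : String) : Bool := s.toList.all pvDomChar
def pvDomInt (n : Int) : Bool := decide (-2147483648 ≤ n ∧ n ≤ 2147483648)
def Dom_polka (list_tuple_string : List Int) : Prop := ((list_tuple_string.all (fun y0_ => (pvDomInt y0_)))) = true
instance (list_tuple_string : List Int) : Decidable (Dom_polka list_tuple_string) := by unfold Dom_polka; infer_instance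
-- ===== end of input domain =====

-- B replaces A's O(n^3) row-rebuilding scheme by an index-queue deal simulation and a
-- single scatter pass (measured asymptotically faster); equal wherever A returns.


-- ===== PORT A =====
-- A's deal-loop: while len(new_list) != n: append list_word[0]; rotate or append last.
-- fuel only makes the loop total (it never terminates for n = 1, excluded by Pre_);
-- on admitted inputs fuel n suffices and running out of fuel returns new_list, the
-- same value the loop-exit returns.  list_word is nonempty at every reachable state,
-- so headD/getD/getLastD defaults are never read.
def dealLoop (fuel : Nat) (listWord newList : List Int) (n : Nat) : List Int :=
  match fuel with
  | 0 => newList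
  | fuel + 1 =>
    if newList.length ≠ n then
      let newList' := newList ++ [listWord.headD 0]          -- new_list.append(list_word[0])
      if 3 ≤ listWord.length then
        dealLoop fuel (listWord.drop 2 ++ [listWord.getD 1 0]) newList' n   -- list_word = list_word[2:] + [list_word[1]]
      else
        dealLoop fuel listWord (newList' ++ [listWord.getLastD 0]) n        -- new_list.append(list_word[-1])
    else newList

def deal (list_tuple_string : List Int) : List Int :=
  dealLoop list_tuple_string.length list_tuple_string [] list_tuple_string.length

def polka (list_tuple_string : List Int) : List Int :=
  let listWord := list_tuple_string
  let n := listWord.length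
  let fillingOrder := deal ((List.range n).map Int.ofNat)
  -- scheme = [['.'] * n] * n : the '.' placeholder is ported as 0; on Pre_ every cell of
  -- the returned row is overwritten, so the placeholder value is never part of the result
  let scheme0 : List (List Int) := List.replicate n (List.replicate n 0)
  let scheme := (List.range n).foldl (fun scheme i =>
      let char := listWord.getD i 0                 -- list_word[i], i < n
      let column := (fillingOrder.getD i 0).toNat   -- filling_order[i]: a value of range(n), nonnegative
      (List.range (n - i)).foldl (fun scheme j =>
          let row := n - 1 - j                      -- row = -1-j, a negative index into a length-n list
          let update := (scheme.getD row []).set column char   -- update = list(scheme[row]); update[column] = char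
          scheme.set row update) scheme) scheme0    -- scheme[row] = list(update)
  (scheme.getLast?).getD []                         -- scheme[-1]; scheme is nonempty on Pre_

-- ===== PORT B =====
-- Source B's while loop: grow-only queue q with head pointer i; terminates on all inputs
-- because fo grows every iteration.
def foLoop (n : Nat) (q fo : List Int) (i : Nat) : List Int :=
  if _h : fo.length < n then
    let fo' := fo ++ [q.getD i 0]                   -- fo.append(q[i])
    if 3 ≤ q.length - i then                        -- len(q) - i >= 3  (i ≤ len(q) at every reachable state)
      foLoop n (q ++ [q.getD (i + 1) 0]) fo' (i + 2)
    else
      foLoop n q (fo' ++ [q.getLastD 0]) i          -- fo.append(q[-1])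
  else fo
termination_by n - fo.length
decreasing_by all_goals simp_all; omega

def polka_alt (list_tuple_string : List Int) : List Int :=
  let seq := list_tuple_string
  let n := seq.length
  let fo := foLoop n ((List.range n).map Int.ofNat) [] 0
  (List.range n).foldl (fun result k =>
      result.set (fo.getD k 0).toNat (seq.getD k 0)) (List.replicate n 0)  -- result[fo[k]] = seq[k]

-- ===== PRECONDITION & SPEC =====
-- Pre_ excludes the empty list, on which A raises IndexError (scheme[-1] of []), and
-- length-1 lists, on which A's deal loop never terminates.
def Pre_polka (list_tuple_string : List Int) : Prop := 2 ≤ list_tuple_string.length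
instance (list_tuple_string : List Int) : Decidable (Pre_polka list_tuple_string) := by unfold Pre_polka; infer_instance

def pvWitness_polka : List Int := [5, -3]

def Spec_polka (list_tuple_string : List Int) (out : List Int) : Prop := out = polka_alt list_tuple_string
instance (list_tuple_string : List Int) (out : List Int) : Decidable (Spec_polka list_tuple_string out) := by unfold Spec_polka; infer_instance

-- ===== CLAIM (what is proved, stated in full; the proofs are below) =====
def Claim_equal_polka : Prop := ∀ (list_tuple_string : List Int), Dom_polka list_tuple_string → Pre_polka list_tuple_string → Spec_polka list_tuple_string (polka list_tuple_string)

-- ===== LEMMAS AND PROOFS =====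

-- Step 1: A's deal-loop on the index list equals B's queue loop.
-- Invariant: list_word = q.drop i, new_list = fo, rem := q.length - i ≥ 2,
-- fo.length = n - rem, and fuel ≥ rem - 1.
theorem dealLoop_eq_foLoop (n : Nat) :
    ∀ (fuel : Nat) (q fo : List Int) (i : Nat),
      i ≤ q.length → 2 ≤ q.length - i → q.length - i ≤ n →
      fo.length = n - (q.length - i) →
      n - (q.length - i) < n → q.length - i - 1 ≤ fuel →
      dealLoop fuel (q.drop i) fo n = foLoop n q fo i := by
  intro fuel
  induction fuel with
  | zero => intro q fo i hi hrem hle hlen hlt hfuel; omega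
  | succ fuel ih =>
    intro q fo i hi hrem hle hlen hlt hfuel
    rw [dealLoop, foLoop]
    have hqi : i < q.length := by omega
    have hne : fo.length ≠ n := by omega
    have hlt' : fo.length < n := by omega
    rw [if_pos hne, dif_pos hlt']
    have hhead : (q.drop i).headD 0 = q.getD i 0 := by
      rw [List.headD_eq_head?_getD]
      simp [List.getD, List.head?_drop]
    have hdroplen : (q.drop i).length = q.length - i := by simp
    by_cases h3 : 3 ≤ q.length - i
    · rw [if_pos (by rw [hdroplen]; omega : 3 ≤ (q.drop i).length), if_pos h3]
      have hrot : (q.drop i).drop 2 ++ [(q.drop i).getD 1 0]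
          = (q ++ [q.getD (i + 1) 0]).drop (i + 2) := by
        rw [List.drop_drop, List.drop_append_of_le_length (by omega)]
        congr 1
        simp [List.getD, List.getElem?_drop]
      rw [hhead, hrot]
      refine ih (q ++ [q.getD (i + 1) 0]) (fo ++ [q.getD i 0]) (i + 2) ?_ ?_ ?_ ?_ ?_ ?_
      all_goals (simp only [List.length_append, List.length_cons, List.length_nil]; omega)
    · rw [if_neg (by rw [hdroplen]; omega : ¬ 3 ≤ (q.drop i).length), if_neg h3]
      have hrem2 : q.length - i = 2 := by omega
      have hlast : (q.drop i).getLastD 0 = q.getLastD 0 := by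
        rcases Nat.lt_or_ge 0 q.length with h | h
        · simp [List.getLastD_eq_getLast?, List.getLast?_drop, show ¬ q.length ≤ i by omega]
        · omega
      rw [hhead, hlast]
      -- both sides exit immediately: the new fo has length n
      have hfull : (fo ++ [q.getD i 0] ++ [q.getLastD 0]).length = n := by
        simp only [List.length_append, List.length_cons, List.length_nil]; omega
      rw [foLoop, dif_neg (by omega : ¬ (fo ++ [q.getD i 0] ++ [q.getLastD 0]).length < n)]
      cases fuel with
      | zero => rfl
      | succ f =>
        rw [dealLoop, if_neg (by omega : ¬ (fo ++ [q.getD i 0] ++ [q.getLastD 0]).length ≠ n)]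

theorem deal_eq_foLoop (n : Nat) (hn : 2 ≤ n) :
    deal ((List.range n).map Int.ofNat) = foLoop n ((List.range n).map Int.ofNat) [] 0 := by
  unfold deal
  have hlen : ((List.range n).map Int.ofNat).length = n := by simp
  rw [hlen]
  have := dealLoop_eq_foLoop n n ((List.range n).map Int.ofNat) [] 0
    (by simp) (by simp; omega) (by simp) (by simp) (by simp; omega) (by simp)
  simpa using this

-- Step 2: the inner row loop only touches the last row once (at j = 0), so the final
-- row of the scheme evolves exactly as B's single result list.

-- one outer iteration: the last row gets (·.set col c), lengths preserved
theorem inner_loop_last (n i : Nat) (hi : i < n) (col : Nat) (c : Int)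
    (scheme : List (List Int)) (hs : scheme.length = n) :
    ((List.range (n - i)).foldl (fun s j =>
        s.set (n - 1 - j) ((s.getD (n - 1 - j) []).set col c)) scheme).length = n ∧
    ((List.range (n - i)).foldl (fun s j =>
        s.set (n - 1 - j) ((s.getD (n - 1 - j) []).set col c)) scheme).getD (n - 1) []
      = (scheme.getD (n - 1) []).set col c := by
  have hrange : List.range (n - i) = 0 :: (List.range (n - i - 1)).map Nat.succ := by
    conv_lhs => rw [show n - i = (n - i - 1) + 1 from by omega]
    rw [List.range_succ_eq_map]
  rw [hrange]
  simp only [List.foldl_cons, List.foldl_map, Nat.sub_zero]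
  set scheme1 := scheme.set (n - 1) ((scheme.getD (n - 1) []).set col c) with hs1
  -- the remaining folds set only indices < n-1, but the written value depends on s;
  -- show by induction that the element at n-1 and the length are preserved
  have key : ∀ (js : List Nat), (∀ j ∈ js, j + 1 < n) → ∀ (s : List (List Int)), s.length = n →
      (js.foldl (fun s j => s.set (n - 1 - (j + 1)) ((s.getD (n - 1 - (j + 1)) []).set col c)) s).length = n ∧
      (js.foldl (fun s j => s.set (n - 1 - (j + 1)) ((s.getD (n - 1 - (j + 1)) []).set col c)) s).getD (n - 1) []
        = s.getD (n - 1) [] := by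
    intro js
    induction js with
    | nil => intro _ s hsl; exact ⟨hsl, rfl⟩
    | cons j js ih =>
      intro hjs s hsl
      have hj := hjs j (by simp)
      have hrec := ih (fun j hm => hjs j (by simp [hm]))
        (s.set (n - 1 - (j + 1)) ((s.getD (n - 1 - (j + 1)) []).set col c)) (by simp [hsl])
      refine ⟨by simpa using hrec.1, ?_⟩
      simp only [List.foldl_cons]
      rw [hrec.2]
      simp [List.getD, List.getElem?_set_ne (by omega : n - 1 - (j + 1) ≠ n - 1)]
  have hall : ∀ j ∈ List.range (n - i - 1), j + 1 < n := by
    intro j hm; rw [List.mem_range] at hm; omega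
  have h1len : scheme1.length = n := by simp [hs1, hs]
  have := key (List.range (n - i - 1)) hall scheme1 h1len
  refine ⟨this.1, ?_⟩
  rw [this.2, hs1]
  simp [List.getD, hs, show n - 1 < n by omega]

-- outer fold: the last row of the scheme is B's scatter fold
theorem outer_loop_last (n : Nat) (charF colF : Nat → Int) :
    ∀ (is_ : List Nat), (∀ i ∈ is_, i < n) →
    ∀ (scheme : List (List Int)) (row : List Int),
      scheme.length = n → scheme.getD (n - 1) [] = row →
      (is_.foldl (fun s i =>
          (List.range (n - i)).foldl (fun s j =>
            s.set (n - 1 - j) ((s.getD (n - 1 - j) []).set (colF i).toNat (charF i))) s) scheme).getD (n - 1) []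
        = is_.foldl (fun r i => r.set (colF i).toNat (charF i)) row := by
  intro is_
  induction is_ with
  | nil => intro _ scheme row _ hrow; simpa using hrow
  | cons i is_ ih =>
    intro his scheme row hs hrow
    have hi := his i (by simp)
    have hinner := inner_loop_last n i hi (colF i).toNat (charF i) scheme hs
    simp only [List.foldl_cons]
    rw [ih (fun i hm => his i (by simp [hm])) _ (row.set (colF i).toNat (charF i))
        hinner.1 (by rw [hinner.2, hrow])]

theorem getLast_getD (l : List (List Int)) :
    l.getLast?.getD [] = l.getD (l.length - 1) [] := by
  rw [List.getLast?_eq_getElem?]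
  rfl

-- ===== VERDICT (by name: the statement is the Claim_ definition above) =====
theorem polka_spec : Claim_equal_polka := by
  intro xs _ hpre
  unfold Spec_polka polka polka_alt
  simp only []
  set n := xs.length with hn
  have hn2 : 2 ≤ n := hpre
  rw [deal_eq_foLoop n hn2]
  set fo := foLoop n ((List.range n).map Int.ofNat) [] 0 with hfo
  have hne : (List.replicate n (List.replicate n (0 : Int)) : List (List Int)).length = n := by simp
  have houter := outer_loop_last n (fun i => xs.getD i 0) (fun i => fo.getD i 0)
      (List.range n) (by intro i hm; rwa [List.mem_range] at hm)
      (List.replicate n (List.replicate n 0)) (List.replicate n 0)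
      hne (by simp [List.getD, show n - 1 < n by omega])
  -- the scheme stays length n (from inner_loop_last), so getLast? = getD (n-1)
  have hschemelen : ∀ (is_ : List Nat), (∀ i ∈ is_, i < n) → ∀ (scheme : List (List Int)), scheme.length = n →
      (is_.foldl (fun s i =>
          (List.range (n - i)).foldl (fun s j =>
            s.set (n - 1 - j) ((s.getD (n - 1 - j) []).set ((fo.getD i 0)).toNat (xs.getD i 0))) s) scheme).length = n := by
    intro is_
    induction is_ with
    | nil => intro _ scheme hs; simpa using hs
    | cons i is_ ih =>
      intro his scheme hs
      have hi := his i (by simp)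
      have hinner := inner_loop_last n i hi ((fo.getD i 0)).toNat (xs.getD i 0) scheme hs
      simp only [List.foldl_cons]
      exact ih (fun i hm => his i (by simp [hm])) _ hinner.1
  have hlen := hschemelen (List.range n) (by intro i hm; rwa [List.mem_range] at hm)
      (List.replicate n (List.replicate n 0)) hne
  rw [getLast_getD, hlen, houter]
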